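-- pv_equiv track=rewrite | github.com/nickinper/sakana-mev-arbitrage | core/evolutionary/crossover.py | _categorize_gene
-- ===== SOURCE A (Python) =====
-- def _categorize_gene(gene: str) -> str:
--     """Categorize a gene for adaptive crossover"""
--     categories = {
--         'gas': ['max_gas_price_gwei', 'gas_multiplier'],
--         'profit': ['min_profit_threshold', 'position_size_pct'],
--         'risk': ['slippage_tolerance', 'confidence_threshold'],
--         'execution': ['execution_delay_blocks', 'flashloan_provider', 'route_complexity']
--     }
--
--     for category, genes in categories.items():
--         if gene in genes:
--             return category
--
--     return 'general'
-- ===== SOURCE B (Python) =====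
-- _GENE_CATEGORY = {
--     'max_gas_price_gwei': 'gas',
--     'gas_multiplier': 'gas',
--     'min_profit_threshold': 'profit',
--     'position_size_pct': 'profit',
--     'slippage_tolerance': 'risk',
--     'confidence_threshold': 'risk',
--     'execution_delay_blocks': 'execution',
--     'flashloan_provider': 'execution',
--     'route_complexity': 'execution',
-- }
--
-- def _categorize_gene(gene: str) -> str:
--     """Categorize a gene for adaptive crossover"""
--     return _GENE_CATEGORY.get(gene, 'general')
-- ===== Notes on version B (the rewrite author's own statement) =====
-- stated objective: idiomatic
-- what changed: Replaces the per-category loop with membership scans over member lists by a single flat gene-to-category dictionary lookup with a default.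
import Mathlib
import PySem

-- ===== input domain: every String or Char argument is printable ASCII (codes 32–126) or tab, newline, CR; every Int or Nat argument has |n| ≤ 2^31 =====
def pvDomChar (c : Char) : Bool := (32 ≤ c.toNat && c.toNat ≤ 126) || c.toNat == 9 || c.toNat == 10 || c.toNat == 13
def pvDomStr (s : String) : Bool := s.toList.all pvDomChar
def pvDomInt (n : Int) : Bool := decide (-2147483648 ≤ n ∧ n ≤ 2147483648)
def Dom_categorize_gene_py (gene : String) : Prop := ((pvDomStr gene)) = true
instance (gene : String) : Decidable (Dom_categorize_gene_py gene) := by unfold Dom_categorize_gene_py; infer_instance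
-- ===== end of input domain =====

-- B replaces A's loop over category → member-list pairs with one flat gene → category lookup (idiomatic).

-- ===== PORT A =====
-- A's local dict literal: category → list of member genes (insertion order).
def pvCategoriesA : List (String × List String) :=
  [("gas", ["max_gas_price_gwei", "gas_multiplier"]),
   ("profit", ["min_profit_threshold", "position_size_pct"]),
   ("risk", ["slippage_tolerance", "confidence_threshold"]),
   ("execution", ["execution_delay_blocks", "flashloan_provider", "route_complexity"])]

-- the 'for category, genes in categories.items(): if gene in genes: return category' loop
def pvLoopA (gene : String) : List (String × List String) → String
  | [] => "general"
  | (category, genes) :: rest =>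
      if genes.contains gene then category else pvLoopA gene rest

def categorize_gene_py (gene : String) : String := pvLoopA gene pvCategoriesA

-- ===== PORT B =====
-- B's flat module-level dict gene → category, as an association list (first match).
def pvGeneCategory : PySem.Dict String String :=
  PySem.Dict.ofList [("max_gas_price_gwei", "gas"),
   ("gas_multiplier", "gas"),
   ("min_profit_threshold", "profit"),
   ("position_size_pct", "profit"),
   ("slippage_tolerance", "risk"),
   ("confidence_threshold", "risk"),
   ("execution_delay_blocks", "execution"),
   ("flashloan_provider", "execution"),
   ("route_complexity", "execution")]

def categorize_gene_py_alt (gene : String) : String :=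
  PySem.Dict.getD pvGeneCategory gene "general"

-- ===== PRECONDITION & SPEC =====
def Spec_categorize_gene_py (gene : String) (out : String) : Prop := out = categorize_gene_py_alt gene
instance (gene : String) (out : String) : Decidable (Spec_categorize_gene_py gene out) := by unfold Spec_categorize_gene_py; infer_instance

-- ===== CLAIM (what is proved, stated in full; the proofs are below) =====
def Claim_equal_categorize_gene_py : Prop := ∀ (gene : String), Dom_categorize_gene_py gene → Spec_categorize_gene_py gene (categorize_gene_py gene)

-- ===== LEMMAS AND PROOFS =====
-- the literal (key, value) items of B's dict, evaluated once
theorem pvGeneCategory_items : pvGeneCategory.items =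
  [("max_gas_price_gwei", "gas"),
   ("gas_multiplier", "gas"),
   ("min_profit_threshold", "profit"),
   ("position_size_pct", "profit"),
   ("slippage_tolerance", "risk"),
   ("confidence_threshold", "risk"),
   ("execution_delay_blocks", "execution"),
   ("flashloan_provider", "execution"),
   ("route_complexity", "execution")] := by decide

-- ===== VERDICT (by name: the statement is the Claim_ definition above) =====
theorem categorize_gene_py_spec : Claim_equal_categorize_gene_py := by
  intro gene _
  show categorize_gene_py gene = categorize_gene_py_alt gene
  by_cases h1 : gene = "max_gas_price_gwei" <;>
  by_cases h2 : gene = "gas_multiplier" <;>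
  by_cases h3 : gene = "min_profit_threshold" <;>
  by_cases h4 : gene = "position_size_pct" <;>
  by_cases h5 : gene = "slippage_tolerance" <;>
  by_cases h6 : gene = "confidence_threshold" <;>
  by_cases h7 : gene = "execution_delay_blocks" <;>
  by_cases h8 : gene = "flashloan_provider" <;>
  by_cases h9 : gene = "route_complexity" <;>
  first
  | (subst_vars; decide)
  | (-- all nine comparisons are false: both sides fall through to "general"
     have b1 : (gene == "max_gas_price_gwei") = false := by simp [h1]
     have c1 : ("max_gas_price_gwei" == gene) = false := by simp [Ne.symm h1]
     have b2 : (gene == "gas_multiplier") = false := by simp [h2]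
     have c2 : ("gas_multiplier" == gene) = false := by simp [Ne.symm h2]
     have b3 : (gene == "min_profit_threshold") = false := by simp [h3]
     have c3 : ("min_profit_threshold" == gene) = false := by simp [Ne.symm h3]
     have b4 : (gene == "position_size_pct") = false := by simp [h4]
     have c4 : ("position_size_pct" == gene) = false := by simp [Ne.symm h4]
     have b5 : (gene == "slippage_tolerance") = false := by simp [h5]
     have c5 : ("slippage_tolerance" == gene) = false := by simp [Ne.symm h5]
     have b6 : (gene == "confidence_threshold") = false := by simp [h6]
     have c6 : ("confidence_threshold" == gene) = false := by simp [Ne.symm h6]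
     have b7 : (gene == "execution_delay_blocks") = false := by simp [h7]
     have c7 : ("execution_delay_blocks" == gene) = false := by simp [Ne.symm h7]
     have b8 : (gene == "flashloan_provider") = false := by simp [h8]
     have c8 : ("flashloan_provider" == gene) = false := by simp [Ne.symm h8]
     have b9 : (gene == "route_complexity") = false := by simp [h9]
     have c9 : ("route_complexity" == gene) = false := by simp [Ne.symm h9]
     simp [categorize_gene_py, categorize_gene_py_alt, pvCategoriesA, pvLoopA,
       List.contains, PySem.Dict.getD, PySem.Dict.get?, pvGeneCategory_items,
       List.find?, List.elem, b1, c1, b2, c2, b3, c3, b4, c4, b5, c5, b6, c6, b7, c7, b8, c8, b9, c9])
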